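-- pv_equiv track=rewrite | github.com/WangRongsheng/QQ-analysis | moniter.py | change_day_list
-- ===== SOURCE A (Python) =====
-- def change_day_list(day_list):
--     back_dict = dict()
--     year_list = []
--     for one_day in day_list:
--         check_year = one_day[0][0:4]
--         if check_year not in year_list:
--             year_list.append(check_year)
--             back_dict[check_year] = []
--         elif check_year in year_list:
--             back_dict[check_year].append(one_day)
--     '''这个sort一下是为了方便后面calendar排序'''
--     # year_list = sorted(year_list)
--     # self.year_list = year_list
--     return back_dict
-- ===== SOURCE B (Python) =====
-- def change_day_list(day_list):
--     groups = {}
--     for one_day in day_list: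
--         year = one_day[0][:4]
--         groups[year] = groups.get(year, []) + [one_day]
--     return {year: days[1:] for year, days in groups.items()}
-- ===== Notes on version B (the rewrite author's own statement) =====
-- stated objective: simpler
-- what changed: B builds the complete per-year grouping in one dict pass (no separate year_list membership scan) and then drops each group's first day with days[1:], reproducing A's behaviour of never storing the first day seen for each year.
import Mathlib
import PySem

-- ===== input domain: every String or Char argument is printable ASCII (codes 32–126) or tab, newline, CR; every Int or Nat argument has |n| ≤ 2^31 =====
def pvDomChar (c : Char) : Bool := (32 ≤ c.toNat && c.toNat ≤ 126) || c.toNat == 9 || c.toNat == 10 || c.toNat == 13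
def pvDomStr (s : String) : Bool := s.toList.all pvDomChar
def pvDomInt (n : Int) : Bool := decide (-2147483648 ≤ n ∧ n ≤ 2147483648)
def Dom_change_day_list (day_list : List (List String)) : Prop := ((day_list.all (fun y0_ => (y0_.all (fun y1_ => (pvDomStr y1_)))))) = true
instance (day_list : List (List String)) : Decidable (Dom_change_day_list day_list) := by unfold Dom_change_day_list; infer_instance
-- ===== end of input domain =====

-- B builds the full per-year grouping in one dict pass and then drops each group's first day
-- with days[1:] (objective: simpler decomposition, same observable result as A).

-- ===== PORT A =====
-- check_year = one_day[0][0:4]  (one_day[0] is in range on Pre_; pyGetD's default is never used there)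
def pvYearOf (one_day : List String) : String :=
  PySem.Str.slice (PySem.List.pyGetD one_day 0 "") (some 0) (some 4)

-- the body of A's for-loop over state (back_dict, year_list); branches in A's order
def pvStepA (st : PySem.Dict String (List (List String)) × List String) (one_day : List String) :
    PySem.Dict String (List (List String)) × List String :=
  let check_year := pvYearOf one_day
  if check_year ∉ st.2 then
    (st.1.insert check_year [], st.2 ++ [check_year])
  else if check_year ∈ st.2 then
    (st.1.modify check_year [] (fun l => l ++ [one_day]), st.2)
  else st

def change_day_list (day_list : List (List String)) : List (String × List (List String)) :=
  (day_list.foldl pvStepA (PySem.Dict.empty, [])).1.items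

-- ===== PORT B =====
-- groups[year] = groups.get(year, []) + [one_day]  (exactly PySem.Dict.modify)
def pvStepB (g : PySem.Dict String (List (List String))) (one_day : List String) :
    PySem.Dict String (List (List String)) :=
  g.modify (pvYearOf one_day) [] (fun l => l ++ [one_day])

def change_day_list_alt (day_list : List (List String)) : List (String × List (List String)) :=
  let groups := day_list.foldl pvStepB PySem.Dict.empty
  groups.items.map (fun p => (p.1, PySem.List.slice p.2 (some 1) none))

-- ===== PRECONDITION & SPEC =====
-- Pre_ excludes exactly the inputs containing an empty inner list, where Python A raises IndexError on one_day[0].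
def Pre_change_day_list (day_list : List (List String)) : Prop :=
  ∀ d ∈ day_list, d ≠ []
instance (day_list : List (List String)) : Decidable (Pre_change_day_list day_list) := by
  unfold Pre_change_day_list; infer_instance

def pvWitness_change_day_list : List (List String) :=
  [["2021-01-01"], ["2021-01-02"], ["2022-03-04"]]

def Spec_change_day_list (day_list : List (List String)) (out : List (String × List (List String))) : Prop := out = change_day_list_alt day_list
instance (day_list : List (List String)) (out : List (String × List (List String))) : Decidable (Spec_change_day_list day_list out) := by unfold Spec_change_day_list; infer_instance

-- ===== CLAIM (what is proved, stated in full; the proofs are below) =====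
def Claim_equal_change_day_list : Prop := ∀ (day_list : List (List String)), Dom_change_day_list day_list → Pre_change_day_list day_list → Spec_change_day_list day_list (change_day_list day_list)

-- ===== LEMMAS AND PROOFS =====

-- the loop invariant: A's dict holds each group's tail, A's year_list is B's key list
lemma pv_loop_eq (l : List (List String)) :
    ∀ (bd g : PySem.Dict String (List (List String))) (yl : List String),
      bd.items = g.items.map (fun p => (p.1, p.2.drop 1)) →
      yl = g.keys →
      g.keys.Nodup →
      (∀ p ∈ g.items, p.2 ≠ []) →
      (l.foldl pvStepA (bd, yl)).1.items
        = (l.foldl pvStepB g).items.map (fun p => (p.1, p.2.drop 1)) := by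
  induction l with
  | nil => intro bd g yl h1 _ _ _; simpa using h1
  | cons d rest ih =>
    intro bd g yl h1 h2 h3 h4
    have hkeys : bd.keys = g.keys := by
      simp only [PySem.Dict.keys, h1, List.map_map]
      rfl
    have hbdnd : bd.keys.Nodup := hkeys ▸ h3
    set y := pvYearOf d with hydef
    by_cases hy : y ∈ g.keys
    · -- the year was seen before: both sides append d to its group
      have hgc : g.contains y = true := (PySem.Dict.contains_iff_mem_keys g y).2 hy
      have hbc : bd.contains y = true := by
        rw [PySem.Dict.contains_iff_mem_keys, hkeys]; exact hy
      obtain ⟨ds0, hds0⟩ : ∃ v, g.get? y = some v := by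
        have := PySem.Dict.contains_eq_isSome_get? g y ▸ hgc
        exact Option.isSome_iff_exists.mp this
      have hgD : g.getD y [] = ds0 := PySem.Dict.getD_of_get?_eq_some g [] hds0
      have hmem0 : (y, ds0) ∈ g.items := PySem.Dict.mem_items_of_get?_eq_some g hds0
      have hne0 : ds0 ≠ [] := h4 _ hmem0
      have hbmem : (y, ds0.drop 1) ∈ bd.items := by
        rw [h1]; exact List.mem_map.2 ⟨(y, ds0), hmem0, rfl⟩
      have hbD : bd.getD y [] = ds0.drop 1 :=
        PySem.Dict.getD_of_mem_items bd hbmem hbdnd []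
      have hstA : pvStepA (bd, yl) d = (bd.insert y (ds0.drop 1 ++ [d]), yl) := by
        simp only [pvStepA, ← hydef, h2, hy, not_true_eq_false, if_false, if_true,
          PySem.Dict.modify, hbD]
      have hstB : pvStepB g d = g.insert y (ds0 ++ [d]) := by
        simp only [pvStepB, ← hydef, PySem.Dict.modify, hgD]
      simp only [List.foldl_cons, hstA, hstB]
      apply ih
      · rw [PySem.Dict.items_insert_of_contains _ _ hbc,
            PySem.Dict.items_insert_of_contains _ _ hgc, h1,
            List.map_map, List.map_map]
        apply List.map_congr_left
        intro p hp
        by_cases hpy : p.1 = y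
        · have hpd : p.2 ≠ [] := h4 _ hp
          simp only [Function.comp, hpy, beq_self_eq_true, if_true]
          cases ds0 with
          | nil => exact absurd rfl hne0
          | cons a t => simp
        · simp [Function.comp, hpy]
      · rw [h2, PySem.Dict.keys_insert_of_contains _ _ hgc]
      · rw [PySem.Dict.keys_insert_of_contains _ _ hgc]; exact h3
      · intro p hp
        rw [PySem.Dict.items_insert_of_contains _ _ hgc] at hp
        obtain ⟨q, hq, hqe⟩ := List.mem_map.1 hp
        by_cases hqy : q.1 = y
        · simp only [hqy, beq_self_eq_true, if_true] at hqe
          rw [← hqe]; simp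
        · simp only [beq_iff_eq, hqy, if_false] at hqe
          rw [← hqe]; exact h4 _ hq
    · -- a fresh year: A creates an empty group, B a one-element group
      have hgc : g.contains y = false := by
        simp only [← Bool.not_eq_true, PySem.Dict.contains_iff_mem_keys]; exact hy
      have hbc : bd.contains y = false := by
        simp only [← Bool.not_eq_true, PySem.Dict.contains_iff_mem_keys, hkeys]; exact hy
      have hgD : g.getD y [] = [] := PySem.Dict.getD_of_not_contains g [] hgc
      have hstA : pvStepA (bd, yl) d = (bd.insert y [], yl ++ [y]) := by
        simp only [pvStepA, ← hydef, h2, hy, not_false_eq_true, if_true]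
      have hstB : pvStepB g d = g.insert y [d] := by
        simp only [pvStepB, ← hydef, PySem.Dict.modify, hgD, List.nil_append]
      simp only [List.foldl_cons, hstA, hstB]
      apply ih
      · rw [PySem.Dict.items_insert_of_not_contains _ _ hbc,
            PySem.Dict.items_insert_of_not_contains _ _ hgc, h1]
        simp
      · rw [h2, PySem.Dict.keys_insert_of_not_contains _ _ hgc]
      · exact PySem.Dict.nodup_keys_insert _ _ _ h3
      · intro p hp
        rw [PySem.Dict.items_insert_of_not_contains _ _ hgc] at hp
        rcases List.mem_append.1 hp with hp | hp
        · exact h4 _ hp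
        · simp only [List.mem_singleton] at hp; rw [hp]; simp

-- ===== VERDICT (by name: the statement is the Claim_ definition above) =====
theorem change_day_list_spec : Claim_equal_change_day_list := by
  intro day_list _ _
  unfold Spec_change_day_list change_day_list change_day_list_alt
  rw [pv_loop_eq day_list PySem.Dict.empty PySem.Dict.empty []
      (by simp [PySem.Dict.empty]) (by simp) (by simp) (by simp [PySem.Dict.empty])]
  apply List.map_congr_left
  intro p _
  rw [PySem.List.slice_from p.2 (by norm_num)]
  rfl
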